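-- pv_equiv track=rewrite | github.com/mainzerp/agent-assist | container/app/entity/ingest.py | _tokenize_entity_id
-- ===== SOURCE A (Python) =====
-- _ID_TOKEN_STOPWORDS: frozenset[str] = frozenset(
--     {
--         "sensor",
--         "binary",
--         "binary_sensor",
--         "light",
--         "switch",
--         "climate",
--         "media",
--         "media_player",
--         "scene",
--         "automation",
--         "weather",
--         "lock",
--         "cover",
--         "fan",
--         "humidifier",
--         "vacuum",
--         "camera",
--         "button",
--         "number",
--         "input",
--         "select",
--         "state",
--         "mode",
--         "temperature",
--         "humidity",
--         "pressure",
--         "moisture",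
--         "battery",
--         "power",
--         "energy",
--     }
-- )
--
-- def _tokenize_entity_id(entity_id: str) -> list[str]:
--     """Split an entity_id into distinctive tokens.
--
--     Splits on ``.`` and ``_``, lowercases, drops empty tokens and
--     structural HA stopwords. Order is preserved; duplicates are
--     removed while keeping the first occurrence.
--     """
--     if not entity_id:
--         return []
--     raw_parts = entity_id.lower().replace(".", "_").split("_")
--     seen: set[str] = set()
--     out: list[str] = []
--     for part in raw_parts:
--         if not part or part in _ID_TOKEN_STOPWORDS or part in seen:
--             continue
--         seen.add(part)
--         out.append(part)
--     return out
-- ===== SOURCE B (Python) =====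
-- _ID_TOKEN_STOPWORDS: frozenset[str] = frozenset(
--     {
--         "sensor", "binary", "binary_sensor", "light", "switch", "climate",
--         "media", "media_player", "scene", "automation", "weather", "lock",
--         "cover", "fan", "humidifier", "vacuum", "camera", "button", "number",
--         "input", "select", "state", "mode", "temperature", "humidity",
--         "pressure", "moisture", "battery", "power", "energy",
--     }
-- )
--
--
-- def _tokenize_entity_id(entity_id: str) -> list[str]:
--     """Recursive head/rest decomposition with no seen-set: keep a good head
--     and DELETE its later occurrences from the remainder before recursing."""
--
--     def go(parts: list[str]) -> list[str]:
--         if not parts: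
--             return []
--         head, rest = parts[0], parts[1:]
--         if not head or head in _ID_TOKEN_STOPWORDS:
--             return go(rest)
--         return [head] + go([p for p in rest if p != head])
--
--     return go(entity_id.lower().replace(".", "_").split("_"))
-- ===== Notes on version B (the rewrite author's own statement) =====
-- stated objective: alternative
-- what changed: Replaces A's single fused loop with an auxiliary seen-set by a recursion on the token list that maintains no state at all: a kept head's later duplicates are deleted from the remainder before recursing, so dedup happens by rewriting the yet-unprocessed input instead of by membership tests against accumulated output.
import Mathlib
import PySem

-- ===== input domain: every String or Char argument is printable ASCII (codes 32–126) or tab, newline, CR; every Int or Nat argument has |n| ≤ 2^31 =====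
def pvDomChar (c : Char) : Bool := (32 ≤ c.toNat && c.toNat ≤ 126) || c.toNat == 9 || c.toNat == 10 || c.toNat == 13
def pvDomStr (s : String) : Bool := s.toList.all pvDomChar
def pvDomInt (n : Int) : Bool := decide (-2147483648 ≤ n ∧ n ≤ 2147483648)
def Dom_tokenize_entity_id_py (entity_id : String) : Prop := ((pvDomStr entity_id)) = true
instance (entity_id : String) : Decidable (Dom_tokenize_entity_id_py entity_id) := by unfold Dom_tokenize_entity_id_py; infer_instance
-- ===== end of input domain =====

-- B: stateless recursion on the token list — a kept head's later duplicates are deleted from the remainder before recursing; no seen-set, no fused loop (alternative decomposition, not faster).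


-- module-level frozenset _ID_TOKEN_STOPWORDS (shared module context of both ports)
def pvStopwords : PySem.Set String := PySem.Set.ofList
  ["sensor", "binary", "binary_sensor", "light", "switch", "climate",
   "media", "media_player", "scene", "automation", "weather", "lock",
   "cover", "fan", "humidifier", "vacuum", "camera", "button", "number",
   "input", "select", "state", "mode", "temperature", "humidity",
   "pressure", "moisture", "battery", "power", "energy"]

-- ===== PORT A =====
-- s.split("_") ported as (PySem.Str.split? s "_").getD [] — exact since the separator "_" ≠ ""
def tokenize_entity_id_py (entity_id : String) : List String :=
  if entity_id = "" then []
  else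
    let raw_parts := (PySem.Str.split? (PySem.Str.replace (PySem.Str.lower entity_id) "." "_") "_").getD []
    let res := raw_parts.foldl
      (fun (st : PySem.Set String × List String) part =>
        if (decide (part = "") || PySem.Set.contains pvStopwords part || PySem.Set.contains st.1 part) = true then st
        else (PySem.Set.add st.1 part, st.2 ++ [part]))
      (PySem.Set.empty, [])
    res.2

-- ===== PORT B =====
-- go(parts): empty → []; bad head → recurse on rest; good head → keep it and recurse on the rest with its duplicates deleted
def pvGo : List String → List String
  | [] => []
  | head :: rest =>
    if (decide (head = "") || PySem.Set.contains pvStopwords head) = true then pvGo rest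
    else head :: pvGo (rest.filter (fun p => p ≠ head))
termination_by l => l.length
decreasing_by
  · simp
  · simp
    exact le_trans (List.length_filter_le _ _) (le_of_eq List.length_attach)

def tokenize_entity_id_py_alt (entity_id : String) : List String :=
  pvGo ((PySem.Str.split? (PySem.Str.replace (PySem.Str.lower entity_id) "." "_") "_").getD [])

-- ===== PRECONDITION & SPEC =====
def Spec_tokenize_entity_id_py (entity_id : String) (out : List String) : Prop := out = tokenize_entity_id_py_alt entity_id
instance (entity_id : String) (out : List String) : Decidable (Spec_tokenize_entity_id_py entity_id out) := by unfold Spec_tokenize_entity_id_py; infer_instance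

-- ===== CLAIM (what is proved, stated in full; the proofs are below) =====
def Claim_equal_tokenize_entity_id_py : Prop := ∀ (entity_id : String), Dom_tokenize_entity_id_py entity_id → Spec_tokenize_entity_id_py entity_id (tokenize_entity_id_py entity_id)

-- ===== LEMMAS AND PROOFS =====

-- A's fused loop equals folding Set.add over the filtered list, whenever seen and out hold the same elements
theorem pvLoop_eq (l : List String) :
    ∀ (s out : List String), (∀ q, q ∈ s ↔ q ∈ out) →
      (l.foldl
        (fun (st : PySem.Set String × List String) part =>
          if (decide (part = "") || PySem.Set.contains pvStopwords part || PySem.Set.contains st.1 part) = true then st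
          else (PySem.Set.add st.1 part, st.2 ++ [part]))
        (s, out)).2
      = (l.filter (fun p => !(p == "") && !(PySem.Set.contains pvStopwords p))).foldl PySem.Set.add out := by
  induction l with
  | nil => intro s out _; simp
  | cons p l ih =>
    intro s out hinv
    by_cases h1 : p = ""
    · have hc : (decide (p = "") || PySem.Set.contains pvStopwords p || PySem.Set.contains s p) = true := by
        simp [h1]
      have hfl : List.filter (fun p => !(p == "") && !(PySem.Set.contains pvStopwords p)) (p :: l)
          = List.filter (fun p => !(p == "") && !(PySem.Set.contains pvStopwords p)) l := by
        simp [h1]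
      rw [List.foldl_cons, if_pos hc, hfl]
      exact ih s out hinv
    · by_cases h2 : p ∈ pvStopwords
      · have hc : (decide (p = "") || PySem.Set.contains pvStopwords p || PySem.Set.contains s p) = true := by
          simp [PySem.Set.contains, h2]
        have hfl : List.filter (fun p => !(p == "") && !(PySem.Set.contains pvStopwords p)) (p :: l)
            = List.filter (fun p => !(p == "") && !(PySem.Set.contains pvStopwords p)) l := by
          simp [PySem.Set.contains, h2]
        rw [List.foldl_cons, if_pos hc, hfl]
        exact ih s out hinv
      · have hfl : List.filter (fun p => !(p == "") && !(PySem.Set.contains pvStopwords p)) (p :: l)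
            = p :: List.filter (fun p => !(p == "") && !(PySem.Set.contains pvStopwords p)) l := by
          simp [PySem.Set.contains, h1, h2]
        by_cases h3 : p ∈ s
        · have hc : (decide (p = "") || PySem.Set.contains pvStopwords p || PySem.Set.contains s p) = true := by
            simp [PySem.Set.contains, h3]
          have hmem : p ∈ out := (hinv p).1 h3
          have ho : PySem.Set.add out p = out := by
            simp [PySem.Set.add, PySem.Set.contains, hmem]
          rw [List.foldl_cons, if_pos hc, hfl, List.foldl_cons, ho]
          exact ih s out hinv
        · have hpo : p ∉ out := fun hmem => h3 ((hinv p).2 hmem)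
          have ho : PySem.Set.add out p = out ++ [p] := by
            simp [PySem.Set.add, PySem.Set.contains, hpo]
          have haddS : PySem.Set.add s p = s ++ [p] := by
            simp [PySem.Set.add, PySem.Set.contains, h3]
          have hinv2 : ∀ q, q ∈ PySem.Set.add s p ↔ q ∈ out ++ [p] := by
            intro q; rw [haddS]; simp [List.mem_append, hinv q]
          rw [List.foldl_cons, if_neg (by simp [PySem.Set.contains]; exact ⟨⟨h1, h2⟩, h3⟩), hfl, List.foldl_cons, ho]
          exact ih _ _ hinv2

-- adding an element already in the accumulator lets us ignore its later occurrences
theorem pvFoldl_drop_dups (h : String) :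
    ∀ (u acc : List String), h ∈ acc →
      List.foldl PySem.Set.add acc u = List.foldl PySem.Set.add acc (u.filter (fun p => p ≠ h)) := by
  intro u
  induction u with
  | nil => intro acc _; rfl
  | cons x u ih =>
    intro acc hmem
    by_cases hx : x = h
    · subst hx
      have : PySem.Set.add acc x = acc := by
        simp [PySem.Set.add, PySem.Set.contains, hmem]
      simp [List.foldl_cons, this, ih acc hmem]
    · have hmem2 : h ∈ PySem.Set.add acc x := by
        unfold PySem.Set.add
        split <;> simp [hmem]
      simp [hx, List.foldl_cons, ih _ hmem2]

-- a head not occurring later stays in front of the fold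
theorem pvFoldl_head (h : String) :
    ∀ (u acc : List String), h ∉ u →
      List.foldl PySem.Set.add (h :: acc) u = h :: List.foldl PySem.Set.add acc u := by
  intro u
  induction u with
  | nil => intro acc _; rfl
  | cons x u ih =>
    intro acc hnm
    have hx : x ≠ h := fun e => hnm (by simp [e])
    have hnm' : h ∉ u := fun m => hnm (by simp [m])
    have hstep : PySem.Set.add (h :: acc) x = h :: PySem.Set.add acc x := by
      by_cases hm : x ∈ acc
      · simp [PySem.Set.add, PySem.Set.contains, hm]
      · simp [PySem.Set.add, PySem.Set.contains, hm, hx]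
    rw [List.foldl_cons, hstep, List.foldl_cons, ih _ hnm']

-- first-occurrence dedup, expressed as deletion of later duplicates
theorem pvDedup_cons (h : String) (u : List String) :
    List.foldl PySem.Set.add [] (h :: u) = h :: List.foldl PySem.Set.add [] (u.filter (fun p => p ≠ h)) := by
  have h0 : PySem.Set.add ([] : List String) h = [h] := by rfl
  rw [List.foldl_cons, h0, pvFoldl_drop_dups h u [h] (by simp),
      pvFoldl_head h _ [] (by simp [List.mem_filter])]

-- B's recursion computes the first-occurrence dedup of the filtered list
theorem pvGo_eq_aux : ∀ (n : Nat) (l : List String), l.length ≤ n →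
    pvGo l = List.foldl PySem.Set.add []
      (l.filter (fun p => !(p == "") && !(PySem.Set.contains pvStopwords p))) := by
  intro n
  induction n with
  | zero =>
    intro l hl
    have hnil : l = [] := List.eq_nil_of_length_eq_zero (Nat.le_zero.mp hl)
    subst hnil
    rw [pvGo.eq_def]
    rfl
  | succ n ih =>
    intro l hl
    match l with
    | [] => rw [pvGo.eq_def]; rfl
    | head :: rest =>
      rw [pvGo.eq_def]
      simp only []
      by_cases hc : (decide (head = "") || PySem.Set.contains pvStopwords head) = true
      · have hfl : List.filter (fun p => !(p == "") && !(PySem.Set.contains pvStopwords p)) (head :: rest)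
            = List.filter (fun p => !(p == "") && !(PySem.Set.contains pvStopwords p)) rest := by
          simp only [Bool.or_eq_true, decide_eq_true_eq] at hc
          rcases hc with h1 | h2
          · simp [h1]
          · have h2' : head ∈ pvStopwords := by simpa [PySem.Set.contains] using h2
            simp [h2']
        rw [if_pos hc, hfl]
        exact ih rest (by simpa using Nat.le_of_succ_le_succ (by simpa using hl))
      · have hc' : head ≠ "" ∧ head ∉ pvStopwords := by
          simp only [Bool.or_eq_true, decide_eq_true_eq, not_or] at hc
          exact ⟨hc.1, by simpa [PySem.Set.contains] using hc.2⟩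
        have hfl : List.filter (fun p => !(p == "") && !(PySem.Set.contains pvStopwords p)) (head :: rest)
            = head :: List.filter (fun p => !(p == "") && !(PySem.Set.contains pvStopwords p)) rest := by
          simp [hc'.1, hc'.2]
        have hcomm : (rest.filter (fun p => p ≠ head)).filter
              (fun p => !(p == "") && !(PySem.Set.contains pvStopwords p))
            = (rest.filter (fun p => !(p == "") && !(PySem.Set.contains pvStopwords p))).filter
              (fun p => p ≠ head) := by
          simp only [List.filter_filter]
          apply List.filter_congr
          intro x _
          simp [Bool.and_comm]
        have hlen : (rest.filter (fun p => p ≠ head)).length ≤ n :=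
          le_trans (List.length_filter_le _ _) (by simpa using Nat.le_of_succ_le_succ (by simpa using hl))
        rw [if_neg hc, ih _ hlen, hcomm, hfl, pvDedup_cons]

theorem pvGo_eq (l : List String) :
    pvGo l = List.foldl PySem.Set.add []
      (l.filter (fun p => !(p == "") && !(PySem.Set.contains pvStopwords p))) :=
  pvGo_eq_aux l.length l le_rfl

-- ===== VERDICT (by name: the statement is the Claim_ definition above) =====
theorem tokenize_entity_id_py_spec : Claim_equal_tokenize_entity_id_py := by
  intro entity_id _
  unfold Spec_tokenize_entity_id_py tokenize_entity_id_py tokenize_entity_id_py_alt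
  rw [pvGo_eq]
  by_cases h : entity_id = ""
  · subst h; decide
  · rw [if_neg h]
    rw [pvLoop_eq _ PySem.Set.empty [] (by intro q; simp [PySem.Set.empty])]
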